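-- pv_equiv track=rewrite | github.com/bennyhodl/hermes-agent | gateway/platforms/slack_utils.py | format_table_as_code_block
-- ===== SOURCE A (Python) =====
-- from typing import Dict, List, Optional, Any, Tuple
--
-- def parse_markdown_table(table_text: str) -> Tuple[List[str], List[List[str]]]:
--     """
--     Parse a markdown table into headers and rows.
--
--     Args:
--         table_text: Raw markdown table text
--
--     Returns:
--         Tuple of (headers, rows)
--     """
--     lines = [
--         line.strip()
--         for line in table_text.strip().split('\n')
--         if line.strip() and line.strip().startswith('|')
--     ]
--
--     if len(lines) < 2:
--         return [], []
--
--     # First line is headers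
--     headers = [
--         cell.strip()
--         for cell in lines[0].split('|')
--         if cell.strip()
--     ]
--
--     # Skip separator line (index 1), parse data rows
--     rows = []
--     for line in lines[2:]:
--         row = [
--             cell.strip()
--             for cell in line.split('|')
--             if cell.strip() or cell == ''
--         ]
--         # Only add non-empty rows
--         if any(cell for cell in row):
--             rows.append(row)
--
--     return headers, rows
--
-- def format_table_as_code_block(table_text: str) -> str:
--     """
--     Format a markdown table as a code block (Slack fallback).
--
--     This preserves the visual structure without Block Kit.
--     """
--     headers, rows = parse_markdown_table(table_text)
--
--     if not headers:
--         return f"```\n{table_text}\n```"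
--
--     # Calculate column widths
--     num_cols = len(headers)
--     widths = [len(str(h)) for h in headers]
--
--     for row in rows:
--         for i, cell in enumerate(row):
--             if i < num_cols:
--                 widths[i] = max(widths[i], len(str(cell)))
--
--     # Build formatted table
--     lines = []
--
--     # Header row
--     header_parts = [
--         str(headers[i]).ljust(widths[i])
--         for i in range(min(len(headers), num_cols))
--     ]
--     lines.append("| " + " | ".join(header_parts) + " |")
--
--     # Separator
--     sep_parts = ["-" * w for w in widths[:num_cols]]
--     lines.append("| " + " | ".join(sep_parts) + " |")
--
--     # Data rows
--     for row in rows: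
--         row_parts = []
--         for i in range(num_cols):
--             cell = str(row[i]) if i < len(row) else ""
--             row_parts.append(cell.ljust(widths[i]))
--         lines.append("| " + " | ".join(row_parts) + " |")
--
--     return "```\n" + "\n".join(lines) + "\n```"
-- ===== SOURCE B (Python) =====
-- def parse_markdown_table(table_text):
--     lines = [
--         line.strip()
--         for line in table_text.strip().split('\n')
--         if line.strip() and line.strip().startswith('|')
--     ]
--     if len(lines) < 2:
--         return [], []
--     headers = [cell.strip() for cell in lines[0].split('|') if cell.strip()]
--     rows = []
--     for line in lines[2:]:
--         row = [cell.strip() for cell in line.split('|') if cell.strip() or cell == '']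
--         if any(cell for cell in row):
--             rows.append(row)
--     return headers, rows
--
--
-- def format_table_as_code_block(table_text):
--     headers, rows = parse_markdown_table(table_text)
--     if not headers:
--         return f"```\n{table_text}\n```"
--     # Build the table COLUMN-MAJOR: each column is its own fully padded strip
--     # (header cell, dash rule, data cells), then read the columns off index by
--     # index to assemble the lines.
--     cols = []
--     for i in range(len(headers)):
--         cells = [row[i] if i < len(row) else "" for row in rows]
--         w = max([len(headers[i])] + [len(c) for c in cells])
--         cols.append([headers[i].ljust(w), "-" * w] + [c.ljust(w) for c in cells])
--     lines = [
--         "| " + " | ".join(col[j] for col in cols) + " |"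
--         for j in range(2 + len(rows))
--     ]
--     return "```\n" + "\n".join(lines) + "\n```"
-- ===== Notes on version B (the rewrite author's own statement) =====
-- stated objective: alternative
-- what changed: B builds the output column-major: each column becomes one fully padded vertical strip (header, dash rule, data cells) with its width computed while the strip is built, and the lines are then assembled by reading the strips index by index (a transpose), replacing A's row-major pipeline of a mutating width pass followed by three separate row-rendering loops.
import Mathlib
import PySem

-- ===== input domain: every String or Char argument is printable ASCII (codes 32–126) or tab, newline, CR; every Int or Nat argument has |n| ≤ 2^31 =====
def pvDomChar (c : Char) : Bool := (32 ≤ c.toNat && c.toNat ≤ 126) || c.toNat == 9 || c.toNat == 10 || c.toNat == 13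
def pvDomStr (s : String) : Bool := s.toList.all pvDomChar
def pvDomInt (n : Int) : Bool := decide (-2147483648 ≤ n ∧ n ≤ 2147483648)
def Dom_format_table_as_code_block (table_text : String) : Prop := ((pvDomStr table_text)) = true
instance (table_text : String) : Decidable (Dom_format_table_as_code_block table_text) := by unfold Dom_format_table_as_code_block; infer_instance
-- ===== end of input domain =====

-- B builds the table column-major (one padded vertical strip per column, width computed with
-- the strip) and assembles the lines by transposing the strips (objective: alternative; same cost).

-- ===== PORT A =====
-- parse_markdown_table, shared verbatim by both Pythons (ported once)
def pvParseMT (t : List Char) : List (List Char) × List (List (List Char)) :=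
  let lines := ((PySem.Chars.splitOn (PySem.Chars.strip t) ['\n']).map
      (fun l => PySem.Chars.strip l)).filter
      (fun l => !l.isEmpty && PySem.Chars.startswith l ['|'])
  if lines.length < 2 then ([], [])
  else
    let headers := ((PySem.Chars.splitOn (lines.getD 0 []) ['|']).filter
        (fun c => !(PySem.Chars.strip c).isEmpty)).map (fun c => PySem.Chars.strip c)
    let rows := (lines.drop 2).foldl (fun acc line =>
        let row := ((PySem.Chars.splitOn line ['|']).filter
            (fun c => !(PySem.Chars.strip c).isEmpty || c.isEmpty)).map
            (fun c => PySem.Chars.strip c)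
        if row.any (fun c => !c.isEmpty) then acc ++ [row] else acc) []
    (headers, rows)

-- str.ljust(w) on code points (hand-ported, exact: pad on the right with spaces to width w)
def pvLjust (cs : List Char) (w : Nat) : List Char := cs ++ List.replicate (w - cs.length) ' '

def format_table_as_code_block (table_text : String) : String :=
  let t := table_text.toList
  let hr := pvParseMT t
  let headers := hr.1
  let rows := hr.2
  if headers = [] then
    String.ofList (('`' :: '`' :: '`' :: '\n' :: t) ++ ['\n', '`', '`', '`'])
  else
    let num_cols := headers.length
    let widths0 := headers.map (fun h => h.length)
    let widths := rows.foldl (fun ws row =>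
        (PySem.List.enumerate row 0).foldl (fun ws p =>
          if p.1 < (num_cols : Int) then
            ws.set p.1.toNat (max (ws.getD p.1.toNat 0) p.2.length)
          else ws) ws) widths0
    let header_parts := (List.range (min headers.length num_cols)).map
        (fun i => pvLjust (headers.getD i []) (widths.getD i 0))
    let line1 := ('|' :: ' ' :: PySem.Chars.join [' ', '|', ' '] header_parts) ++ [' ', '|']
    let sep_parts := (widths.take num_cols).map (fun w => List.replicate w '-')
    let line2 := ('|' :: ' ' :: PySem.Chars.join [' ', '|', ' '] sep_parts) ++ [' ', '|']
    let dataLines := rows.map (fun row =>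
        let row_parts := (List.range num_cols).map (fun i =>
          pvLjust (if i < row.length then row.getD i [] else []) (widths.getD i 0))
        ('|' :: ' ' :: PySem.Chars.join [' ', '|', ' '] row_parts) ++ [' ', '|'])
    let lines := line1 :: line2 :: dataLines
    String.ofList (('`' :: '`' :: '`' :: '\n' :: PySem.Chars.join ['\n'] lines) ++ ['\n', '`', '`', '`'])

-- ===== PORT B =====
def format_table_as_code_block_alt (table_text : String) : String :=
  let t := table_text.toList
  let hr := pvParseMT t
  let headers := hr.1
  let rows := hr.2
  if headers = [] then
    String.ofList (('`' :: '`' :: '`' :: '\n' :: t) ++ ['\n', '`', '`', '`'])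
  else
    let cols := (List.range headers.length).map (fun i =>
        let cells := rows.map (fun row => if i < row.length then row.getD i [] else [])
        let w := (cells.map (fun c => c.length)).foldl max (headers.getD i []).length
        pvLjust (headers.getD i []) w :: List.replicate w '-' :: cells.map (fun c => pvLjust c w))
    let lines := (List.range (2 + rows.length)).map (fun j =>
        ('|' :: ' ' :: PySem.Chars.join [' ', '|', ' '] (cols.map (fun col => col.getD j []))) ++ [' ', '|'])
    String.ofList (('`' :: '`' :: '`' :: '\n' :: PySem.Chars.join ['\n'] lines) ++ ['\n', '`', '`', '`'])

-- ===== PRECONDITION & SPEC =====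
def Spec_format_table_as_code_block (table_text : String) (out : String) : Prop := out = format_table_as_code_block_alt table_text
instance (table_text : String) (out : String) : Decidable (Spec_format_table_as_code_block table_text out) := by unfold Spec_format_table_as_code_block; infer_instance

-- ===== CLAIM (what is proved, stated in full; the proofs are below) =====
def Claim_equal_format_table_as_code_block : Prop := ∀ (table_text : String), Dom_format_table_as_code_block table_text → Spec_format_table_as_code_block table_text (format_table_as_code_block table_text)

-- ===== LEMMAS AND PROOFS =====

-- the inner width-update loop of A, in closed form at each index
lemma pv_inner_loop (n : Nat) :
    ∀ (r : List (List Char)) (s : Nat) (ws : List Nat), ws.length = n →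
    let ws' := (PySem.List.enumerate r (s : Int)).foldl (fun ws p =>
        if p.1 < (n : Int) then ws.set p.1.toNat (max (ws.getD p.1.toNat 0) p.2.length)
        else ws) ws
    ws'.length = n ∧ ∀ i : Nat,
      ws'.getD i 0 = if s ≤ i ∧ i - s < r.length ∧ i < n
        then max (ws.getD i 0) ((r.getD (i - s) []).length) else ws.getD i 0 := by
  intro r
  induction r with
  | nil =>
    intro s ws hws
    refine ⟨hws, fun i => ?_⟩
    simp [PySem.List.enumerate_nil]
  | cons c cr ih =>
    intro s ws hws
    rw [PySem.List.enumerate_cons]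
    simp only [List.foldl_cons]
    set ws1 := (if (s : Int) < (n : Int) then
        ws.set (s : Int).toNat (max (ws.getD (s : Int).toNat 0) c.length) else ws) with hws1
    have hlen1 : ws1.length = n := by
      rw [hws1]; split <;> simp [hws]
    have hget1 : ∀ i : Nat, ws1.getD i 0 =
        if i = s ∧ s < n then max (ws.getD s 0) c.length else ws.getD i 0 := by
      intro i
      rw [hws1]
      by_cases hsn : s < n
      · have hsn' : (s : Int) < (n : Int) := by exact_mod_cast hsn
        rw [if_pos hsn']
        simp only [Int.toNat_natCast]
        by_cases his : i = s
        · subst his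
          rw [if_pos ⟨rfl, hsn⟩]
          have : i < ws.length := by omega
          rw [List.getD_eq_getElem _ _ (by simpa [hws] using hsn),
              List.getElem_set_self]
        · rw [if_neg (by tauto)]
          rcases Nat.lt_or_ge i ws.length with h | h
          · rw [List.getD_eq_getElem _ _ (by simpa using h),
                List.getD_eq_getElem _ _ h, List.getElem_set_ne (by omega)]
          · rw [List.getD_eq_default _ _ (by simpa using h),
                List.getD_eq_default _ _ h]
      · have hsn' : ¬ (s : Int) < (n : Int) := by exact_mod_cast hsn
        rw [if_neg hsn', if_neg (by tauto)]
    have hst : ((s : Int) + 1) = ((s + 1 : Nat) : Int) := by push_cast; ring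
    rw [hst]
    obtain ⟨hl, hg⟩ := ih (s + 1) ws1 hlen1
    refine ⟨hl, fun i => ?_⟩
    rw [hg i]
    rcases Nat.lt_trichotomy i s with hlt | heqs | hgt
    · have e : ws1.getD i 0 = ws.getD i 0 := by
        rw [hget1 i, if_neg (by rintro ⟨h, -⟩; omega)]
      rw [e, if_neg (by rintro ⟨h, -⟩; omega), if_neg (by rintro ⟨h, -⟩; omega)]
    · subst heqs
      rw [if_neg (by rintro ⟨h, -⟩; omega), hget1 i]
      by_cases hsn : i < n
      · rw [if_pos ⟨rfl, hsn⟩, if_pos ⟨le_refl _, by simp, hsn⟩]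
        simp
      · rw [if_neg (by rintro ⟨-, h⟩; omega),
            if_neg (by rintro ⟨-, -, h⟩; omega)]
    · have e : ws1.getD i 0 = ws.getD i 0 := by
        rw [hget1 i, if_neg (by rintro ⟨h, -⟩; omega)]
      rw [e]
      have hsub : i - s = (i - (s + 1)) + 1 := by omega
      rw [hsub, List.getD_cons_succ]
      by_cases hC1 : s + 1 ≤ i ∧ i - (s + 1) < cr.length ∧ i < n
      · rw [if_pos hC1, if_pos ⟨by omega, by simp only [List.length_cons]; omega, hC1.2.2⟩]
      · rw [if_neg hC1, if_neg (by
          rintro ⟨ha, hb, hc⟩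
          simp only [List.length_cons] at hb
          exact hC1 ⟨by omega, by omega, hc⟩)]

-- A's row-by-row widths fold equals the column-by-column maxima
lemma pv_widths_fold (n : Nat) :
    ∀ (rows : List (List (List Char))) (ws : List Nat), ws.length = n →
    rows.foldl (fun ws row =>
        (PySem.List.enumerate row 0).foldl (fun ws p =>
          if p.1 < (n : Int) then ws.set p.1.toNat (max (ws.getD p.1.toNat 0) p.2.length)
          else ws) ws) ws
    = (List.range n).map (fun i => rows.foldl
        (fun w r => if i < r.length then max w ((r.getD i []).length) else w) (ws.getD i 0)) := by
  intro rows
  induction rows with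
  | nil =>
    intro ws hws
    simp only [List.foldl_nil]
    refine List.ext_getElem (by simp [hws]) (fun i h1 h2 => ?_)
    simp only [List.getElem_map, List.getElem_range]
    simp [List.getD, List.getElem?_eq_getElem h1]
  | cons r rest ih =>
    intro ws hws
    simp only [List.foldl_cons]
    have h := pv_inner_loop n r 0 ws hws
    simp only [Nat.cast_zero, Nat.zero_le, Nat.sub_zero, true_and] at h
    obtain ⟨hl, hg⟩ := h
    rw [ih _ hl]
    refine List.map_congr_left (fun i hi => ?_)
    rw [List.mem_range] at hi
    rw [hg i]
    by_cases hr : i < r.length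
    · rw [if_pos ⟨hr, hi⟩, if_pos hr]
    · rw [if_neg (by tauto), if_neg hr]

-- the per-column guarded fold equals B's fold over the padded column cells
lemma pv_pad_fold (i : Nat) (rows : List (List (List Char))) (init : Nat) :
    ((rows.map (fun row => if i < row.length then row.getD i [] else [])).map
        (fun c => c.length)).foldl max init
    = rows.foldl (fun w r => if i < r.length then max w ((r.getD i []).length) else w) init := by
  induction rows generalizing init with
  | nil => rfl
  | cons r rest ih =>
    simp only [List.map_cons, List.foldl_cons]
    by_cases h : i < r.length
    · rw [if_pos h, if_pos h, ih]
    · rw [if_neg h, if_neg h]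
      simp only [List.length_nil, Nat.max_zero]
      exact ih init

-- the else-branches of the two ports produce the same string
lemma pv_else_eq (headers : List (List Char)) (rows : List (List (List Char))) :
    (let num_cols := headers.length
     let widths0 := headers.map (fun h => h.length)
     let widths := rows.foldl (fun ws row =>
         (PySem.List.enumerate row 0).foldl (fun ws p =>
           if p.1 < (num_cols : Int) then
             ws.set p.1.toNat (max (ws.getD p.1.toNat 0) p.2.length)
           else ws) ws) widths0
     let header_parts := (List.range (min headers.length num_cols)).map
         (fun i => pvLjust (headers.getD i []) (widths.getD i 0))
     let line1 := ('|' :: ' ' :: PySem.Chars.join [' ', '|', ' '] header_parts) ++ [' ', '|']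
     let sep_parts := (widths.take num_cols).map (fun w => List.replicate w '-')
     let line2 := ('|' :: ' ' :: PySem.Chars.join [' ', '|', ' '] sep_parts) ++ [' ', '|']
     let dataLines := rows.map (fun row =>
         let row_parts := (List.range num_cols).map (fun i =>
           pvLjust (if i < row.length then row.getD i [] else []) (widths.getD i 0))
         ('|' :: ' ' :: PySem.Chars.join [' ', '|', ' '] row_parts) ++ [' ', '|'])
     let lines := line1 :: line2 :: dataLines
     String.ofList (('`' :: '`' :: '`' :: '\n' :: PySem.Chars.join ['\n'] lines) ++ ['\n', '`', '`', '`']))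
    =
    (let cols := (List.range headers.length).map (fun i =>
         let cells := rows.map (fun row => if i < row.length then row.getD i [] else [])
         let w := (cells.map (fun c => c.length)).foldl max (headers.getD i []).length
         pvLjust (headers.getD i []) w :: List.replicate w '-' :: cells.map (fun c => pvLjust c w))
     let lines := (List.range (2 + rows.length)).map (fun j =>
         ('|' :: ' ' :: PySem.Chars.join [' ', '|', ' '] (cols.map (fun col => col.getD j []))) ++ [' ', '|'])
     String.ofList (('`' :: '`' :: '`' :: '\n' :: PySem.Chars.join ['\n'] lines) ++ ['\n', '`', '`', '`'])) := by
  simp only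
  set n := headers.length with hn
  set wfun : Nat → Nat := fun i =>
      ((rows.map (fun row => if i < row.length then row.getD i [] else [])).map
        (fun c => c.length)).foldl max (headers.getD i []).length with hwfun
  -- A's widths list in closed form
  have hWA : rows.foldl (fun ws row =>
        (PySem.List.enumerate row 0).foldl (fun ws p =>
          if p.1 < (n : Int) then ws.set p.1.toNat (max (ws.getD p.1.toNat 0) p.2.length)
          else ws) ws) (headers.map (fun h => h.length))
      = (List.range n).map wfun := by
    rw [pv_widths_fold n rows (headers.map (fun h => h.length)) (by simp [hn])]
    refine List.map_congr_left (fun i hi => ?_)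
    rw [List.mem_range] at hi
    rw [hwfun]
    simp only
    rw [pv_pad_fold]
    congr 1
    rw [List.getD_eq_getElem _ _ (by simpa using hi), List.getElem_map,
        List.getD_eq_getElem _ _ hi]
  rw [hWA]
  set WA := (List.range n).map wfun with hWAdef
  have hWAlen : WA.length = n := by simp [hWAdef]
  have hWAget : ∀ i, i < n → WA.getD i 0 = wfun i := by
    intro i hi
    rw [hWAdef, List.getD_eq_getElem _ _ (by simpa using hi), List.getElem_map,
        List.getElem_range]
  -- it suffices that the two lists of lines coincide
  refine congrArg (fun L => String.ofList (('`' :: '`' :: '`' :: '\n' ::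
      PySem.Chars.join ['\n'] L) ++ ['\n', '`', '`', '`'])) ?_
  refine List.ext_getElem (by simp only [List.length_cons, List.length_map, List.length_range]; omega) (fun j h1 h2 => ?_)
  -- B's line j, rewritten through the column strips
  have hBcols : ∀ j : Nat,
      ((List.range n).map (fun i =>
          pvLjust (headers.getD i []) (wfun i) :: List.replicate (wfun i) '-' ::
          (rows.map (fun row => if i < row.length then row.getD i [] else [])).map
            (fun c => pvLjust c (wfun i)))).map (fun col => col.getD j [])
      = (List.range n).map (fun i =>
          (pvLjust (headers.getD i []) (wfun i) :: List.replicate (wfun i) '-' ::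
          (rows.map (fun row => if i < row.length then row.getD i [] else [])).map
            (fun c => pvLjust c (wfun i))).getD j []) := by
    intro j; rw [List.map_map]; rfl
  simp only [List.getElem_map, List.getElem_range]
  rw [hBcols]
  -- case split on the line index
  match j, h1 with
  | 0, _ =>
    -- header line
    simp only [List.getElem_cons_zero]
    refine congrArg (fun l => ('|' :: ' ' :: PySem.Chars.join [' ', '|', ' '] l) ++ [' ', '|']) ?_
    rw [Nat.min_self]
    refine List.map_congr_left (fun i hi => ?_)
    rw [List.mem_range] at hi
    rw [hWAget i hi]
    rfl
  | 1, _ =>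
    -- separator line
    simp only [List.getElem_cons_succ, List.getElem_cons_zero]
    refine congrArg (fun l => ('|' :: ' ' :: PySem.Chars.join [' ', '|', ' '] l) ++ [' ', '|']) ?_
    rw [List.take_of_length_le (le_of_eq hWAlen), hWAdef, List.map_map]
    rfl
  | (k + 2), h1 =>
    -- data line k
    have hk : k < rows.length := by
      simp only [List.length_cons, List.length_map] at h1; omega
    simp only [List.getElem_cons_succ, List.getElem_map]
    refine congrArg (fun l => ('|' :: ' ' :: PySem.Chars.join [' ', '|', ' '] l) ++ [' ', '|']) ?_
    refine List.map_congr_left (fun i hi => ?_)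
    rw [List.mem_range] at hi
    rw [hWAget i hi]
    simp only [List.getD_cons_succ]
    have hk2 : k < ((rows.map (fun row => if i < row.length then row.getD i [] else [])).map
        (fun c => pvLjust c (wfun i))).length := by simpa using hk
    rw [List.getD_eq_getElem _ _ hk2]
    simp [List.getElem_map]

-- ===== VERDICT (by name: the statement is the Claim_ definition above) =====
theorem format_table_as_code_block_spec : Claim_equal_format_table_as_code_block := by
  intro t _
  show format_table_as_code_block t = format_table_as_code_block_alt t
  simp only [format_table_as_code_block, format_table_as_code_block_alt]
  generalize pvParseMT t.toList = pr
  obtain ⟨headers, rows⟩ := pr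
  by_cases h : headers = []
  · rw [if_pos h, if_pos h]
  · rw [if_neg h, if_neg h]
    exact pv_else_eq headers rows
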